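-- pv_equiv track=rewrite | github.com/Thebe01/GlycoReport-Downloader | utils.py | host_is_allowed
-- ===== SOURCE A (Python) =====
-- from typing import Optional
--
-- def _normalize_hostname(hostname: Optional[str]) -> Optional[str]:
--     if hostname is None:
--         return None
--     host = hostname.strip().lower().rstrip(".")
--     return host or None
--
-- def host_is_allowed(hostname: Optional[str], allowed_hosts: list[str], allow_subdomains: bool = False) -> bool:
--     """Retourne True si hostname est autorisé.
--
--     Évite les pièges des checks par sous-chaîne en travaillant sur la valeur
--     normalisée du hostname.
--     """
--     host = _normalize_hostname(hostname)
--     if host is None: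
--         return False
--
--     normalized_allowed = [_normalize_hostname(h) for h in allowed_hosts]
--     normalized_allowed = [h for h in normalized_allowed if h]
--
--     if host in normalized_allowed:
--         return True
--
--     if allow_subdomains:
--         return any(host.endswith("." + allowed) for allowed in normalized_allowed)
--
--     return False
-- ===== SOURCE B (Python) =====
-- from typing import Optional
--
-- def _normalize_hostname(hostname: Optional[str]) -> Optional[str]:
--     if hostname is None:
--         return None
--     host = hostname.strip().lower().rstrip(".")
--     return host or None
--
-- def host_is_allowed(hostname: Optional[str], allowed_hosts: list[str], allow_subdomains: bool = False) -> bool: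
--     """Set-based lookup: build a set of normalized allowed hosts, then check the
--     host itself and (if allow_subdomains) each dotted suffix of the host against
--     the set, instead of scanning the allow-list with endswith per entry."""
--     host = _normalize_hostname(hostname)
--     if host is None:
--         return False
--     allowed = {h for h in (_normalize_hostname(e) for e in allowed_hosts) if h}
--     if host in allowed:
--         return True
--     if allow_subdomains:
--         for i, ch in enumerate(host):
--             if ch == '.' and host[i + 1:] in allowed:
--                 return True
--     return False
-- ===== Notes on version B (the rewrite author's own statement) =====
-- stated objective: alternative
-- what changed: Instead of scanning the allow-list testing host.endswith('.'+entry) per entry, B builds a set of normalized allowed hosts once and looks up the host and each dotted suffix of the host in that set.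
import Mathlib
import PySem

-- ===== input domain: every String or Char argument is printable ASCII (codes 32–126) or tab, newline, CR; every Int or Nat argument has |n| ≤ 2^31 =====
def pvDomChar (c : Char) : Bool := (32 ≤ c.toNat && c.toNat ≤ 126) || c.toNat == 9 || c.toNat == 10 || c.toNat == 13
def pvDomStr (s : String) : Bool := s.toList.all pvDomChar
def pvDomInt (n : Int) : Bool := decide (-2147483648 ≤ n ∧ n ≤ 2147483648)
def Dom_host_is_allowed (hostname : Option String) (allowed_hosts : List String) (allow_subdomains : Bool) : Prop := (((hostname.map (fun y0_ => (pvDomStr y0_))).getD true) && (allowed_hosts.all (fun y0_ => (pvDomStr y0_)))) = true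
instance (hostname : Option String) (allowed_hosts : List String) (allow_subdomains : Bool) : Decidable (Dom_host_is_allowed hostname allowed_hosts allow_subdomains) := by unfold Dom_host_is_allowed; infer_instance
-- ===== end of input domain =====

set_option maxHeartbeats 1000000


-- B replaces A's endswith scan over the allow-list by a set of normalized
-- allowed hosts looked up for the host and each dotted suffix of the host
-- (objective: alternative).

-- ===== PORT A =====
-- shared helper _normalize_hostname (used by both Pythons): strip, lower, rstrip(".").
-- rstrip(".") is ported by hand on List Char (drop trailing '.' chars) — exact.
def normalizeHostname (hostname : Option String) : Option String :=
  match hostname with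
  | none => none
  | some s =>
    let t := PySem.Str.lower (PySem.Str.strip s)
    let host := String.ofList ((t.toList.reverse.dropWhile (fun c => c == '.')).reverse)
    if host = "" then none else some host

def host_is_allowed (hostname : Option String) (allowed_hosts : List String) (allow_subdomains : Bool) : Bool :=
  match normalizeHostname hostname with
  | none => false
  | some host =>
    let normalized0 := allowed_hosts.map (fun h => normalizeHostname (some h))
    -- [h for h in normalized_allowed if h]: keeps exactly the truthy entries (not None, not "")
    let normalized := normalized0.filterMap (fun h? =>
      match h? with
      | none => none
      | some s => if s = "" then none else some s)
    if normalized.contains host then true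
    else if allow_subdomains then
      normalized.any (fun allowed => PySem.Str.endswith host ("." ++ allowed))
    else false

-- ===== PORT B =====
-- 'for i, ch in enumerate(host): if ch == "." and host[i+1:] in allowed' —
-- the structural scan over host.toList checks exactly the suffix after each '.'.
def suffixScan (allowed : PySem.Set String) : List Char → Bool
  | [] => false
  | c :: rest =>
    (c == '.' && PySem.Set.contains allowed (String.ofList rest)) || suffixScan allowed rest

def host_is_allowed_alt (hostname : Option String) (allowed_hosts : List String) (allow_subdomains : Bool) : Bool :=
  match normalizeHostname hostname with
  | none => false
  | some host =>
    -- {h for h in (_normalize_hostname(e) for e in allowed_hosts) if h}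
    let allowed : PySem.Set String := PySem.Set.ofList
      ((allowed_hosts.map (fun e => normalizeHostname (some e))).filterMap (fun h? =>
        match h? with
        | none => none
        | some s => if s = "" then none else some s))
    if PySem.Set.contains allowed host then true
    else if allow_subdomains then suffixScan allowed host.toList
    else false

-- ===== PRECONDITION & SPEC =====
def Spec_host_is_allowed (hostname : Option String) (allowed_hosts : List String) (allow_subdomains : Bool) (out : Bool) : Prop := out = host_is_allowed_alt hostname allowed_hosts allow_subdomains
instance (hostname : Option String) (allowed_hosts : List String) (allow_subdomains : Bool) (out : Bool) : Decidable (Spec_host_is_allowed hostname allowed_hosts allow_subdomains out) := by unfold Spec_host_is_allowed; infer_instance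

-- ===== CLAIM =====
def Claim_equal_host_is_allowed : Prop := ∀ (hostname : Option String) (allowed_hosts : List String) (allow_subdomains : Bool), Dom_host_is_allowed hostname allowed_hosts allow_subdomains → Spec_host_is_allowed hostname allowed_hosts allow_subdomains (host_is_allowed hostname allowed_hosts allow_subdomains)

-- ===== LEMMAS AND PROOFS =====

-- suffixScan finds exactly the set elements that are dotted suffixes of cs
theorem suffixScan_iff (S : PySem.Set String) (cs : List Char) :
    suffixScan S cs = true ↔ ∃ a, a ∈ S ∧ ('.' :: a.toList) <:+ cs := by
  induction cs with
  | nil =>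
    constructor
    · intro h; simp [suffixScan] at h
    · rintro ⟨a, -, h⟩; simpa using h.length_le
  | cons c rest ih =>
    simp only [suffixScan, Bool.or_eq_true, Bool.and_eq_true, beq_iff_eq,
      PySem.Set.contains_iff, ih]
    constructor
    · rintro (⟨hc, hm⟩ | ⟨a, ha, hs⟩)
      · exact ⟨String.ofList rest, hm, by simp [hc]⟩
      · exact ⟨a, ha, hs.trans (List.suffix_cons c rest)⟩
    · rintro ⟨a, ha, hs⟩
      rcases (List.suffix_cons_iff.mp hs) with heq | hs'
      · injection heq with hc hr
        refine Or.inl ⟨hc.symm, ?_⟩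
        have : a = String.ofList rest := by
          apply String.toList_injective; simp [← hr]
        exact this ▸ ha
      · exact Or.inr ⟨a, ha, hs'⟩

theorem endswith_any_eq_suffixScan (L : List String) (host : String) :
    L.any (fun allowed => PySem.Str.endswith host ("." ++ allowed))
      = suffixScan (PySem.Set.ofList L) host.toList := by
  rw [Bool.eq_iff_iff, List.any_eq_true, suffixScan_iff]
  constructor
  · rintro ⟨a, ha, he⟩
    refine ⟨a, (PySem.Set.mem_ofList _ _).mpr ha, ?_⟩
    rw [PySem.Str.endswith_eq] at he
    have := (PySem.Chars.endswith_iff _ _).mp he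
    simpa using this
  · rintro ⟨a, ha, hs⟩
    refine ⟨a, (PySem.Set.mem_ofList _ _).mp ha, ?_⟩
    rw [PySem.Str.endswith_eq]
    exact (PySem.Chars.endswith_iff _ _).mpr (by simpa using hs)

theorem contains_ofList_eq (L : List String) (x : String) :
    PySem.Set.contains (PySem.Set.ofList L) x = L.contains x := by
  rw [Bool.eq_iff_iff, PySem.Set.contains_iff, PySem.Set.mem_ofList, List.contains_iff_mem]

-- ===== VERDICT =====
theorem host_is_allowed_spec : Claim_equal_host_is_allowed := by
  intro hostname allowed_hosts allow_subdomains _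
  unfold Spec_host_is_allowed
  cases h : normalizeHostname hostname with
  | none => simp only [host_is_allowed, host_is_allowed_alt, h]
  | some host =>
    simp only [host_is_allowed, host_is_allowed_alt, h]
    rw [contains_ofList_eq, endswith_any_eq_suffixScan]
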